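-- pv_equiv track=rewrite | github.com/Omar-bit/Polygon-Collision-bonus | Polygon-Collision-bonus.py | polygon_collision
-- ===== SOURCE A (Python) =====
-- def polygon_collision(poly1, poly2):
--     test=False
--     for x1,y1 in poly1:
--         doubt=False
--         x2min=min([i for i,g in poly2 ])
--         x2max=max([i for i,g in poly2 ])
--         for x2,y2 in poly2:
--             if x2min<=x1<=x2max:
--                 y2min=min([g for i,g in poly2 ])
--                 y2max=max([g for i,g in poly2 ])
--                 if y2min<=y1<=y2max:
--                     test=True
--     return test
-- ===== SOURCE B (Python) =====
-- def polygon_collision(poly1, poly2):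
--     if not poly2:
--         return False
--     xs = [x for x, _ in poly2]
--     ys = [y for _, y in poly2]
--     xmin, xmax = min(xs), max(xs)
--     ymin, ymax = min(ys), max(ys)
--     return any(xmin <= x <= xmax and ymin <= y <= ymax for x, y in poly1)
-- ===== Notes on version B (the rewrite author's own statement) =====
-- stated objective: faster
-- what changed: B computes poly2's bounding box once and makes a single any() pass over poly1, removing A's per-vertex min/max recomputation and A's redundant inner loop over poly2
import Mathlib
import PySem

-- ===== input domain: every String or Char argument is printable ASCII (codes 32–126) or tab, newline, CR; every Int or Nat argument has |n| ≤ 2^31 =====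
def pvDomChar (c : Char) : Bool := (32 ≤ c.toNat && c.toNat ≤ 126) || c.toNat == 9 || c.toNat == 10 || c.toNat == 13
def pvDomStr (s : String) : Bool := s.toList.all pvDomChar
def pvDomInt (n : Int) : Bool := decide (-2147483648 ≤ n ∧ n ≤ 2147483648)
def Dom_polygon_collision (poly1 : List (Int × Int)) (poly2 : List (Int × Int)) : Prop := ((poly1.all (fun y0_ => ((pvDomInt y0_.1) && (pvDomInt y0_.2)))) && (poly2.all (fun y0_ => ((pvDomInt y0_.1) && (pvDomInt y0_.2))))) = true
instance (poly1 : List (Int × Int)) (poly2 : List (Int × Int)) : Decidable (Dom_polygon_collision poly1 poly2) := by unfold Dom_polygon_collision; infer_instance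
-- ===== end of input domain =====

-- B computes poly2's bounding box once and scans poly1 in one pass (O(n+m) vs A's O(n*m));
-- return values proved equal wherever A returns (Pre_ excludes exactly A's ValueError inputs).

-- ===== PORT A =====
-- literal transliteration of A: per poly1-vertex recomputed min/max, inner loop over poly2
def polygon_collision (poly1 : List (Int × Int)) (poly2 : List (Int × Int)) : Bool :=
  poly1.foldl (fun test p =>
    let x1 := p.1
    let y1 := p.2
    let x2min := (PySem.List.min? (poly2.map Prod.fst) (fun v => v)).getD 0   -- none (= ValueError) only outside Pre_
    let x2max := (PySem.List.max? (poly2.map Prod.fst) (fun v => v)).getD 0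
    poly2.foldl (fun test _ =>
      if x2min ≤ x1 ∧ x1 ≤ x2max then
        let y2min := (PySem.List.min? (poly2.map Prod.snd) (fun v => v)).getD 0
        let y2max := (PySem.List.max? (poly2.map Prod.snd) (fun v => v)).getD 0
        if y2min ≤ y1 ∧ y1 ≤ y2max then true else test
      else test) test) false

-- ===== PORT B =====
def polygon_collision_alt (poly1 : List (Int × Int)) (poly2 : List (Int × Int)) : Bool :=
  match poly2 with
  | [] => false
  | _ :: _ =>
    let xs := poly2.map Prod.fst
    let ys := poly2.map Prod.snd
    let xmin := (PySem.List.min? xs (fun v => v)).getD 0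
    let xmax := (PySem.List.max? xs (fun v => v)).getD 0
    let ymin := (PySem.List.min? ys (fun v => v)).getD 0
    let ymax := (PySem.List.max? ys (fun v => v)).getD 0
    poly1.any (fun p => xmin ≤ p.1 && p.1 ≤ xmax && ymin ≤ p.2 && p.2 ≤ ymax)

-- ===== PRECONDITION & SPEC =====
-- Pre_ excludes exactly the inputs where A raises ValueError: poly1 nonempty with poly2 empty.
def Pre_polygon_collision (poly1 : List (Int × Int)) (poly2 : List (Int × Int)) : Prop :=
  poly2 ≠ [] ∨ poly1 = []
instance (poly1 : List (Int × Int)) (poly2 : List (Int × Int)) : Decidable (Pre_polygon_collision poly1 poly2) := by unfold Pre_polygon_collision; infer_instance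
def pvWitness_polygon_collision : (List (Int × Int)) × (List (Int × Int)) :=
  ([(0, 0), (5, 5)], [(-1, -1), (2, 3)])

def Spec_polygon_collision (poly1 : List (Int × Int)) (poly2 : List (Int × Int)) (out : Bool) : Prop := out = polygon_collision_alt poly1 poly2
instance (poly1 : List (Int × Int)) (poly2 : List (Int × Int)) (out : Bool) : Decidable (Spec_polygon_collision poly1 poly2 out) := by unfold Spec_polygon_collision; infer_instance

-- ===== CLAIM (what is proved, stated in full; the proofs are below) =====
def Claim_equal_polygon_collision : Prop := ∀ (poly1 : List (Int × Int)) (poly2 : List (Int × Int)), Dom_polygon_collision poly1 poly2 → Pre_polygon_collision poly1 poly2 → Spec_polygon_collision poly1 poly2 (polygon_collision poly1 poly2)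

-- ===== LEMMAS AND PROOFS =====

-- A's inner loop body ignores its poly2 element and is idempotent: over a nonempty list it acts once.
theorem foldl_const_idem {α : Type} (g : Bool → Bool) (hg : ∀ t, g (g t) = g t)
    (l : List α) (t : Bool) (hl : l ≠ []) :
    l.foldl (fun acc (_ : α) => g acc) t = g t := by
  induction l generalizing t with
  | nil => exact absurd rfl hl
  | cons a l ih =>
    cases l with
    | nil => rfl
    | cons b l' => rw [List.foldl_cons, ih (g t) (by simp), hg]

-- A's outer loop is an 'any' accumulator.
theorem foldl_or_any {α : Type} (f : α → Bool) (l : List α) (b : Bool) :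
    l.foldl (fun acc p => acc || f p) b = (b || l.any f) := by
  induction l generalizing b with
  | nil => simp
  | cons a l ih => simp [List.foldl_cons, ih, Bool.or_assoc]

-- ===== VERDICT (by name: the statement is the Claim_ definition above) =====
theorem polygon_collision_spec : Claim_equal_polygon_collision := by
  intro poly1 poly2 _ hpre
  unfold Spec_polygon_collision polygon_collision polygon_collision_alt
  rcases hpre with h2 | h1
  · obtain ⟨q, qs, rfl⟩ := List.exists_cons_of_ne_nil h2
    simp only
    have hinner : ∀ (x1 y1 : Int) (t : Bool),
        (q :: qs).foldl (fun test (_ : Int × Int) =>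
          if ((PySem.List.min? ((q :: qs).map Prod.fst) (fun v => v)).getD 0 ≤ x1 ∧
              x1 ≤ (PySem.List.max? ((q :: qs).map Prod.fst) (fun v => v)).getD 0) then
            if ((PySem.List.min? ((q :: qs).map Prod.snd) (fun v => v)).getD 0 ≤ y1 ∧
                y1 ≤ (PySem.List.max? ((q :: qs).map Prod.snd) (fun v => v)).getD 0) then true else test
          else test) t
        = (t || decide (((PySem.List.min? ((q :: qs).map Prod.fst) (fun v => v)).getD 0 ≤ x1 ∧
              x1 ≤ (PySem.List.max? ((q :: qs).map Prod.fst) (fun v => v)).getD 0) ∧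
             ((PySem.List.min? ((q :: qs).map Prod.snd) (fun v => v)).getD 0 ≤ y1 ∧
              y1 ≤ (PySem.List.max? ((q :: qs).map Prod.snd) (fun v => v)).getD 0))) := by
      intro x1 y1 t
      rw [foldl_const_idem _ (by intro t; split_ifs <;> rfl) _ _ (by simp)]
      split_ifs with hx hy <;> simp_all
    simp only [hinner]
    rw [foldl_or_any]
    simp only [Bool.false_or]
    refine List.any_congr rfl (fun p => ?_)
    simp only [Bool.decide_and, Bool.and_assoc]
  · subst h1
    cases poly2 <;> rfl
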